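-- pv_equiv track=rewrite | github.com/la-moss/KubeClaw | agent/main.py | _first_fact_line
-- ===== SOURCE A (Python) =====
-- FACT_KEYWORDS = (
--     "database_url",
--     "does-not-exist",
--     "insufficient cpu",
--     "oomkilled",
--     "readiness probe failed",
--     "selector",
--     "endpoints",
--     "resourcequota",
--     "secret",
--     "500",
--     "exit code",
--     "reason",
-- )
--
-- def _first_fact_line(text: str) -> str:
--     lines = [line.strip() for line in text.splitlines() if line.strip()]
--     if not lines:
--         return "no output"
--     lowered = [line.lower() for line in lines]
--     for keyword in FACT_KEYWORDS:
--         for idx, line in enumerate(lowered):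
--             if keyword in line:
--                 return lines[idx]
--     return lines[0]
-- ===== SOURCE B (Python) =====
-- FACT_KEYWORDS = (
--     "database_url",
--     "does-not-exist",
--     "insufficient cpu",
--     "oomkilled",
--     "readiness probe failed",
--     "selector",
--     "endpoints",
--     "resourcequota",
--     "secret",
--     "500",
--     "exit code",
--     "reason",
-- )
--
-- def _first_fact_line(text: str) -> str:
--     lines = [s for s in (ln.strip() for ln in text.splitlines()) if s]
--     if not lines:
--         return "no output"
--     K = len(FACT_KEYWORDS)
--     best_rank, best_line = K, lines[0]
--     for line in lines:
--         low = line.lower()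
--         rank = next((i for i, kw in enumerate(FACT_KEYWORDS) if kw in low), K)
--         if rank < best_rank:
--             best_rank, best_line = rank, line
--     return best_line
-- ===== Notes on version B (the rewrite author's own statement) =====
-- stated objective: alternative
-- what changed: A loops keyword-major (for each keyword in priority order it rescans the whole line list); B makes a single line-major pass that computes each line's best keyword rank and keeps the first line with the strictly smallest rank, with identical preprocessing and fallbacks.
import Mathlib
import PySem

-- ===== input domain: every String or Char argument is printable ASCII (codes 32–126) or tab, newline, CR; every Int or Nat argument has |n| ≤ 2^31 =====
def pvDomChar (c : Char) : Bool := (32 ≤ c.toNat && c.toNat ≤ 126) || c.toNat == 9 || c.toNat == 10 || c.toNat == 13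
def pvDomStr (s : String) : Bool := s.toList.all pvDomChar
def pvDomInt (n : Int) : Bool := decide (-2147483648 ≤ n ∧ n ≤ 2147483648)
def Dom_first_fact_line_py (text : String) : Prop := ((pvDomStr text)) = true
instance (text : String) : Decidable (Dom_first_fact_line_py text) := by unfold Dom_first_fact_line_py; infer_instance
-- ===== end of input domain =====

-- B replaces A's keyword-major nested scan by a single line-major pass keeping the best (minimal) keyword rank seen so far.


def factKeywords : List String :=
  ["database_url", "does-not-exist", "insufficient cpu", "oomkilled",
   "readiness probe failed", "selector", "endpoints", "resourcequota",
   "secret", "500", "exit code", "reason"]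

-- ===== PORT A =====
-- inner loop: for idx, line in enumerate(lowered): if keyword in line: return lines[idx]
def innerA (kw : String) : List (String × String) → Option String
  | [] => none
  | (orig, low) :: rest => if PySem.Str.isIn kw low then some orig else innerA kw rest

-- outer loop: for keyword in FACT_KEYWORDS: …
def outerA (pairs : List (String × String)) : List String → Option String
  | [] => none
  | kw :: kws =>
    match innerA kw pairs with
    | some r => some r
    | none => outerA pairs kws

def first_fact_line_py (text : String) : String :=
  let lines := ((PySem.Str.splitlines text).map PySem.Str.strip).filter (fun l => l != "")
  match lines with
  | [] => "no output"
  | l0 :: _ =>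
    let lowered := lines.map PySem.Str.lower
    match outerA (lines.zip lowered) factKeywords with
    | some r => r
    | none => l0

-- ===== PORT B =====
-- rank = next((i for i, kw in enumerate(FACT_KEYWORDS) if kw in low), K)
def kwRank (kws : List String) (low : String) : Nat :=
  kws.findIdx (fun k => PySem.Str.isIn k low)

-- single pass keeping the best (smallest) rank seen so far, strict improvement only
def bestGo : List String → Nat → String → String
  | [], _, best => best
  | l :: ls, bestRank, best =>
    let r := kwRank factKeywords (PySem.Str.lower l)
    if r < bestRank then bestGo ls r l else bestGo ls bestRank best

def first_fact_line_py_alt (text : String) : String :=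
  let lines := ((PySem.Str.splitlines text).map PySem.Str.strip).filter (fun l => l != "")
  match lines with
  | [] => "no output"
  | l0 :: _ => bestGo lines factKeywords.length l0

-- ===== PRECONDITION & SPEC =====
def Spec_first_fact_line_py (text : String) (out : String) : Prop := out = first_fact_line_py_alt text
instance (text : String) (out : String) : Decidable (Spec_first_fact_line_py text out) := by unfold Spec_first_fact_line_py; infer_instance

-- ===== CLAIM (what is proved, stated in full; the proofs are below) =====
def Claim_equal_first_fact_line_py : Prop := ∀ (text : String), Dom_first_fact_line_py text → Spec_first_fact_line_py text (first_fact_line_py text)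

-- ===== LEMMAS AND PROOFS =====

-- rank of a line w.r.t. a keyword list
def rnk (kws : List String) (l : String) : Nat := kwRank kws (PySem.Str.lower l)

-- minimum rank over a list of lines, capped at kws.length
def Mfun (kws : List String) (ls : List String) : Nat :=
  ls.foldr (fun l acc => min (rnk kws l) acc) kws.length

theorem Mfun_nil (kws : List String) : Mfun kws [] = kws.length := rfl

theorem Mfun_cons (kws : List String) (a : String) (t : List String) :
    Mfun kws (a :: t) = min (rnk kws a) (Mfun kws t) := rfl

theorem find?_congr_mem {α : Type} {p q : α → Bool} :
    ∀ (l : List α), (∀ x ∈ l, p x = q x) → l.find? p = l.find? q := by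
  intro l
  induction l with
  | nil => intro _; rfl
  | cons a t ih =>
    intro h
    simp only [List.find?_cons, h a (by simp)]
    cases q a <;> simp [ih (fun x hx => h x (by simp [hx]))]

theorem innerA_eq_find? (kw : String) :
    ∀ (lines : List String),
      innerA kw (lines.zip (lines.map PySem.Str.lower)) =
        lines.find? (fun l => PySem.Str.isIn kw (PySem.Str.lower l)) := by
  intro lines
  induction lines with
  | nil => rfl
  | cons a t ih =>
    simp only [List.map_cons, List.zip_cons_cons, innerA, List.find?_cons]
    cases h : PySem.Str.isIn kw (PySem.Str.lower a) <;> simp [h, ih]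

theorem rnk_le (kws : List String) (l : String) : rnk kws l ≤ kws.length :=
  List.findIdx_le_length

theorem Mfun_le (kws : List String) : ∀ (ls : List String), Mfun kws ls ≤ kws.length := by
  intro ls
  induction ls with
  | nil => simp [Mfun_nil]
  | cons a t ih => rw [Mfun_cons]; omega

theorem Mfun_le_of_mem (kws : List String) :
    ∀ (ls : List String) (x : String), x ∈ ls → Mfun kws ls ≤ rnk kws x := by
  intro ls
  induction ls with
  | nil => simp
  | cons a t ih =>
    intro x hx
    rw [Mfun_cons]
    rcases List.mem_cons.mp hx with rfl | hx
    · omega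
    · have := ih x hx; omega

theorem Mfun_achieved (kws : List String) :
    ∀ (ls : List String), Mfun kws ls < kws.length → ∃ x ∈ ls, rnk kws x = Mfun kws ls := by
  intro ls
  induction ls with
  | nil => simp [Mfun_nil]
  | cons a t ih =>
    intro h
    rw [Mfun_cons] at h ⊢
    by_cases hle : rnk kws a ≤ Mfun kws t
    · exact ⟨a, by simp, by omega⟩
    · obtain ⟨x, hx, hrx⟩ := ih (by omega)
      exact ⟨x, by simp [hx], by omega⟩

theorem foldr_min_succ (f g : String → Nat) (K : Nat) :
    ∀ (ls : List String), (∀ l ∈ ls, f l = g l + 1) →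
      ls.foldr (fun l acc => min (f l) acc) (K + 1) =
        ls.foldr (fun l acc => min (g l) acc) K + 1 := by
  intro ls
  induction ls with
  | nil => intro _; rfl
  | cons a t ih =>
    intro h
    simp only [List.foldr_cons, ih (fun l hl => h l (by simp [hl])), h a (by simp)]
    omega

theorem rnk_cons (kw : String) (kws : List String) (l : String) :
    rnk (kw :: kws) l =
      if PySem.Str.isIn kw (PySem.Str.lower l) then 0 else rnk kws l + 1 := by
  unfold rnk kwRank
  rw [List.findIdx_cons]
  cases h : PySem.Str.isIn kw (PySem.Str.lower l) <;> simp [h]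

theorem Achar : ∀ (kws lines : List String),
    outerA (lines.zip (lines.map PySem.Str.lower)) kws =
      if Mfun kws lines < kws.length then
        lines.find? (fun l => rnk kws l == Mfun kws lines)
      else none := by
  intro kws
  induction kws with
  | nil =>
    intro lines
    have h0 : Mfun [] lines ≤ 0 := by simpa using Mfun_le [] lines
    simp [outerA, Nat.le_zero.mp h0]
  | cons kw kws ih =>
    intro lines
    simp only [outerA, innerA_eq_find?]
    cases hfind : lines.find? (fun l => PySem.Str.isIn kw (PySem.Str.lower l)) with
    | some r =>
      have hmem := List.mem_of_find?_eq_some hfind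
      have hp : PySem.Str.isIn kw (PySem.Str.lower r) = true := by
        have := List.find?_some hfind
        simpa using this
      have hr0 : rnk (kw :: kws) r = 0 := by rw [rnk_cons, if_pos hp]
      have hM0 : Mfun (kw :: kws) lines = 0 := by
        have := Mfun_le_of_mem (kw :: kws) lines r hmem; omega
      have hfind' : lines.find? (fun l => rnk (kw :: kws) l == 0) = some r := by
        rw [find?_congr_mem lines (q := fun l => PySem.Str.isIn kw (PySem.Str.lower l))
          (fun x _ => by
            rw [rnk_cons]
            cases h : PySem.Str.isIn kw (PySem.Str.lower x) <;>
              simp only [h, if_true, if_false] <;> simp)]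
        exact hfind
      rw [if_pos (by simp [hM0]), hM0, hfind']
    | none =>
      have hall : ∀ l ∈ lines, PySem.Str.isIn kw (PySem.Str.lower l) = false := by
        intro l hl
        have := List.find?_eq_none.mp hfind l hl
        simpa using this
      have hshift : ∀ l ∈ lines, rnk (kw :: kws) l = rnk kws l + 1 := by
        intro l hl
        rw [rnk_cons, if_neg (by rw [hall l hl]; simp)]
      have hM : Mfun (kw :: kws) lines = Mfun kws lines + 1 := by
        simpa [Mfun] using
          foldr_min_succ (rnk (kw :: kws)) (rnk kws) kws.length lines hshift
      rw [ih lines, hM]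
      by_cases hlt : Mfun kws lines < kws.length
      · rw [if_pos hlt, if_pos (by simp only [List.length_cons]; omega)]
        apply find?_congr_mem
        intro x hx
        rw [hshift x hx]
        cases h : (rnk kws x == Mfun kws lines)
        · have hne : rnk kws x ≠ Mfun kws lines := by simpa using h
          symm
          simp only [beq_eq_false_iff_ne, ne_eq]
          omega
        · have he : rnk kws x = Mfun kws lines := by simpa using h
          symm
          simp only [beq_iff_eq]
          omega
      · rw [if_neg hlt, if_neg (by simp only [List.length_cons]; omega)]

theorem Bchar : ∀ (ls : List String) (b : Nat) (best : String),
    bestGo ls b best =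
      if Mfun factKeywords ls < b then
        (ls.find? (fun l => rnk factKeywords l == Mfun factKeywords ls)).getD best
      else best := by
  intro ls
  induction ls with
  | nil =>
    intro b best
    simp only [bestGo, Mfun_nil, List.find?_nil]
    split <;> simp
  | cons a t ih =>
    intro b best
    simp only [bestGo]
    have hra : rnk factKeywords a = kwRank factKeywords (PySem.Str.lower a) := rfl
    set r := kwRank factKeywords (PySem.Str.lower a) with hr
    have hrK : r ≤ factKeywords.length := by rw [← hra]; exact rnk_le _ _
    have hMt := Mfun_le factKeywords t
    rw [Mfun_cons, hra]
    by_cases hlt : r < b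
    · rw [if_pos hlt, ih r a]
      by_cases hMr : Mfun factKeywords t < r
      · rw [if_pos hMr, if_pos (by omega), min_eq_right (by omega)]
        obtain ⟨x, hx, hrx⟩ := Mfun_achieved factKeywords t (by omega)
        have hsome : (t.find? (fun l => rnk factKeywords l == Mfun factKeywords t)).isSome := by
          rw [List.find?_isSome]
          exact ⟨x, hx, by simp [hrx]⟩
        obtain ⟨v, hv⟩ := Option.isSome_iff_exists.mp hsome
        have hfa : (rnk factKeywords a == Mfun factKeywords t) = false := by
          simp only [hra, beq_eq_false_iff_ne, ne_eq]; omega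
        rw [List.find?_cons, hfa, hv]
        rfl
      · have hfa : (rnk factKeywords a == r) = true := by simp [hra]
        rw [if_neg hMr, min_eq_left (by omega), if_pos hlt, List.find?_cons, hfa]
        rfl
    · rw [if_neg hlt, ih b best]
      by_cases hMb : Mfun factKeywords t < b
      · have hfa : (rnk factKeywords a == Mfun factKeywords t) = false := by
          simp only [hra, beq_eq_false_iff_ne, ne_eq]; omega
        rw [if_pos hMb, if_pos (by omega), min_eq_right (by omega), List.find?_cons, hfa]
      · rw [if_neg hMb, if_neg (by omega)]

-- ===== VERDICT (by name: the statement is the Claim_ definition above) =====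
theorem first_fact_line_py_spec : Claim_equal_first_fact_line_py := by
  intro text _
  unfold Spec_first_fact_line_py first_fact_line_py first_fact_line_py_alt
  cases hl : ((PySem.Str.splitlines text).map PySem.Str.strip).filter (fun l => l != "") with
  | nil => rfl
  | cons l0 rest =>
    simp only [hl]
    rw [Achar, Bchar]
    by_cases hlt : Mfun factKeywords (l0 :: rest) < factKeywords.length
    · rw [if_pos hlt, if_pos hlt]
      obtain ⟨x, hx, hrx⟩ := Mfun_achieved factKeywords (l0 :: rest) hlt
      have hsome : ((l0 :: rest).find? (fun l => rnk factKeywords l == Mfun factKeywords (l0 :: rest))).isSome := by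
        rw [List.find?_isSome]
        exact ⟨x, hx, by simp [hrx]⟩
      obtain ⟨v, hv⟩ := Option.isSome_iff_exists.mp hsome
      rw [hv]
      rfl
    · rw [if_neg hlt, if_neg hlt]
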